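-- pv_equiv track=rewrite | github.com/mingchen2cg/HIAS-proposal-agent | llm_utils.py | parse_template_sections
-- ===== SOURCE A (Python) =====
-- def parse_template_sections(template):
--     """Parses the proposal template into a list of sections."""
--     sections = []
--     current_section = None
--     for line in template.strip().split('\n'):
--         if line.startswith('## '):
--             if current_section: sections.append(current_section)
--             current_section = {"title": line[3:], "content": line + "\n"}
--         elif current_section:
--             current_section["content"] += line + "\n"
--     if current_section: sections.append(current_section)
--     return sections
-- ===== SOURCE B (Python) =====
-- def parse_template_sections(template):
--     """Parses the proposal template into a list of sections.
--
--     Two-pointer block scan: find each '## ' header, scan ahead to the next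
--     header (or end), then slice the block out and join it in one step.
--     """
--     lines = template.strip().split('\n')
--     n = len(lines)
--     sections = []
--     i = 0
--     while i < n:
--         if lines[i].startswith('## '):
--             j = i + 1
--             while j < n and not lines[j].startswith('## '):
--                 j += 1
--             sections.append({"title": lines[i][3:],
--                              "content": "\n".join(lines[i:j]) + "\n"})
--             i = j
--         else:
--             i += 1
--     return sections
-- ===== Notes on version B (the rewrite author's own statement) =====
-- stated objective: alternative
-- what changed: Replaces the single-pass mutable current_section accumulator with a two-pointer block scan: locate each '## ' header, advance a second index to the next header, and build the section from the slice with one join instead of repeated string concatenation.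
import Mathlib
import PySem

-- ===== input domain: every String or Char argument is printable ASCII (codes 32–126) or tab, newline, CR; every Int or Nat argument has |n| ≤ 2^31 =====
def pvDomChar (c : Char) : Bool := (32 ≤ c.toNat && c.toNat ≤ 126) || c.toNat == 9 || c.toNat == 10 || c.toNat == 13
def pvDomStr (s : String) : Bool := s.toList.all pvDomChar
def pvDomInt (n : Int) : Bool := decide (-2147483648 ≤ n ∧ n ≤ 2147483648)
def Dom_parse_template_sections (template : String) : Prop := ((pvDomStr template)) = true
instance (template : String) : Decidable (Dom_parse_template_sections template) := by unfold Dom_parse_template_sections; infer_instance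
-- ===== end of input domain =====

-- B replaces A's mutable current_section accumulator with a two-pointer block scan
-- (find header, scan to next header, slice + join); equal output, a different decomposition.
-- Strings are handled as List Char (PySem.Chars) and packed with String.ofList, since Lean's
-- own String.append is opaque to the kernel.

-- shared by both ports: the dict {"title": t, "content": c} as an assoc list
def pvSec (t c : List Char) : List (String × String) :=
  [("title", String.ofList t), ("content", String.ofList c)]

-- ===== PORT A =====
-- the loop body of A: state = (sections, current_section as Option (title, content))
def pvStep (st : List (List (String × String)) × Option (List Char × List Char))
    (line : List Char) : List (List (String × String)) × Option (List Char × List Char) :=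
  if PySem.Chars.startswith line ['#', '#', ' '] then
    (match st.2 with
     | some p => st.1 ++ [pvSec p.1 p.2]          -- if current_section: sections.append(...)
     | none => st.1,
     some (PySem.List.slice line (some 3) none, line ++ ['\n']))   -- line[3:], line + "\n"
  else
    match st.2 with
    | some p => (st.1, some (p.1, p.2 ++ line ++ ['\n']))          -- content += line + "\n"
    | none => st

-- the trailing 'if current_section: sections.append(current_section)'
def pvFinish (st : List (List (String × String)) × Option (List Char × List Char)) :
    List (List (String × String)) :=
  match st.2 with
  | some p => st.1 ++ [pvSec p.1 p.2]
  | none => st.1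

def parse_template_sections (template : String) : List (List (String × String)) :=
  pvFinish (((PySem.Chars.splitOn (PySem.Chars.strip template.toList) ['\n'])).foldl
    pvStep ([], none))

-- ===== PORT B =====
-- inner while: advance j to the next '## ' header (or n)
def pvFindNext (lines : List (List Char)) (n j : Nat) : Nat :=
  if h : j < n ∧
      ¬ PySem.Chars.startswith (PySem.List.pyGetD lines (j : Int) []) ['#', '#', ' '] then
    pvFindNext lines n (j + 1)
  else j
termination_by n - j
decreasing_by omega

theorem pvFindNext_ge (lines : List (List Char)) (n j : Nat) : j ≤ pvFindNext lines n j := by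
  unfold pvFindNext
  split
  · exact le_trans (Nat.le_succ j) (pvFindNext_ge lines n (j + 1))
  · exact Nat.le_refl j
termination_by n - j
decreasing_by omega

-- outer while over i
def pvLoop (lines : List (List Char)) (n i : Nat) : List (List (String × String)) :=
  if h : i < n then
    if PySem.Chars.startswith (PySem.List.pyGetD lines (i : Int) []) ['#', '#', ' '] then
      pvSec (PySem.List.slice (PySem.List.pyGetD lines (i : Int) []) (some 3) none)
            (PySem.Chars.join ['\n']
               (PySem.List.slice lines (some (i : Int))
                 (some ((pvFindNext lines n (i + 1) : Nat) : Int))) ++ ['\n'])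
        :: pvLoop lines n (pvFindNext lines n (i + 1))
    else pvLoop lines n (i + 1)
  else []
termination_by n - i
decreasing_by
  · have := pvFindNext_ge lines n (i + 1); omega
  · omega

def parse_template_sections_alt (template : String) : List (List (String × String)) :=
  pvLoop (PySem.Chars.splitOn (PySem.Chars.strip template.toList) ['\n'])
    (PySem.Chars.splitOn (PySem.Chars.strip template.toList) ['\n']).length 0

-- ===== PRECONDITION & SPEC =====
def Spec_parse_template_sections (template : String) (out : List (List (String × String))) : Prop := out = parse_template_sections_alt template
instance (template : String) (out : List (List (String × String))) : Decidable (Spec_parse_template_sections template out) := by unfold Spec_parse_template_sections; infer_instance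

-- ===== CLAIM (what is proved, stated in full; the proofs are below) =====
def Claim_equal_parse_template_sections : Prop := ∀ (template : String), Dom_parse_template_sections template → Spec_parse_template_sections template (parse_template_sections template)

-- ===== LEMMAS AND PROOFS =====

-- abbreviations used only by the proofs
def pvHdr (l : List Char) : Bool := PySem.Chars.startswith l ['#', '#', ' ']

-- every line of a block followed by '\n' (the content string A accumulates)
def pvJoinNl (block : List (List Char)) : List Char := (block.map (· ++ ['\n'])).flatten

-- the common recursive description both ports reduce to
def pvGo : List (List Char) → List (List (String × String))
  | [] => []
  | l :: rest =>
    if pvHdr l then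
      pvSec (PySem.List.slice l (some 3) none)
            (pvJoinNl (l :: rest.takeWhile (fun x => !pvHdr x)))
        :: pvGo (rest.dropWhile (fun x => !pvHdr x))
    else pvGo rest
termination_by ls => ls.length
decreasing_by
  · simp only [List.length_cons]
    have := List.length_dropWhile_le (fun x => !pvHdr x) rest
    omega
  · simp

theorem pv_dropWhile_eq_drop {α : Type} (p : α → Bool) (xs : List α) :
    xs.dropWhile p = xs.drop (xs.takeWhile p).length := by
  induction xs with
  | nil => simp
  | cons x xs ih =>
    by_cases h : p x = true <;> simp [h, ih]

theorem pv_take_takeWhile {α : Type} (p : α → Bool) (xs : List α) :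
    xs.take (xs.takeWhile p).length = xs.takeWhile p := by
  induction xs with
  | nil => simp
  | cons x xs ih =>
    by_cases h : p x = true <;> simp [h, ih]

-- "\n".join(block) + "\n" = each line followed by '\n', for a nonempty block
theorem pv_join_nl (l : List Char) (tw : List (List Char)) :
    PySem.Chars.join ['\n'] (l :: tw) ++ ['\n'] = pvJoinNl (l :: tw) := by
  induction tw generalizing l with
  | nil => simp [PySem.Chars.join_singleton, pvJoinNl]
  | cons m tw ih =>
    rw [PySem.Chars.join_cons_cons]
    have := ih m
    simp only [pvJoinNl, List.map_cons, List.flatten_cons] at this ⊢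
    simp [← this]

theorem pv_getD (lines : List (List Char)) (j : Nat) (hj : j < lines.length) :
    PySem.List.pyGetD lines (j : Int) [] = lines[j] := by
  rw [PySem.List.pyGetD_natCast]; exact List.getD_eq_getElem lines [] hj

-- pvFindNext finds exactly the end of the run of non-header lines
theorem pvFindNext_eq (lines : List (List Char)) (j : Nat) :
    pvFindNext lines lines.length j
      = j + ((lines.drop j).takeWhile (fun x => !pvHdr x)).length := by
  unfold pvFindNext
  split
  · rename_i h
    obtain ⟨hj, hh⟩ := h
    rw [pv_getD lines j hj] at hh
    rw [pvFindNext_eq lines (j + 1), List.drop_eq_getElem_cons hj, List.takeWhile_cons]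
    have hb : (!pvHdr lines[j]) = true := by simp [pvHdr]; simpa using hh
    rw [hb]
    simp only [if_true, List.length_cons]
    omega
  · rename_i h
    rcases Nat.lt_or_ge j lines.length with hj | hj
    · have hh : pvHdr lines[j] = true := by
        by_contra hc
        exact h ⟨hj, by rw [pv_getD lines j hj]; simpa [pvHdr] using hc⟩
      rw [List.drop_eq_getElem_cons hj, List.takeWhile_cons]
      simp [hh]
    · rw [List.drop_eq_nil_of_le hj]; simp
termination_by lines.length - j
decreasing_by omega

-- B's index loop computes pvGo of the remaining suffix
theorem pvLoop_eq (lines : List (List Char)) (i : Nat) :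
    pvLoop lines lines.length i = pvGo (lines.drop i) := by
  rw [pvLoop]
  split
  · rename_i hi
    have hd : lines.drop i = lines[i] :: lines.drop (i + 1) := List.drop_eq_getElem_cons hi
    rw [pv_getD lines i hi, hd]
    have hfn : pvFindNext lines lines.length (i + 1)
        = i + 1 + ((lines.drop (i + 1)).takeWhile (fun x => !pvHdr x)).length :=
      pvFindNext_eq lines (i + 1)
    by_cases hh : PySem.Chars.startswith lines[i] ['#', '#', ' '] = true
    · rw [if_pos hh, pvGo]
      have hh' : pvHdr lines[i] = true := hh
      rw [if_pos hh']
      set tw := (lines.drop (i + 1)).takeWhile (fun x => !pvHdr x) with htw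
      have hslice :
          PySem.List.slice lines (some (i : Int)) (some ((i + 1 + tw.length : Nat) : Int))
            = lines[i] :: tw := by
        rw [PySem.List.slice_natCast]
        have he : i + 1 + tw.length - i = tw.length + 1 := by omega
        rw [he, hd, List.take_succ_cons, htw, pv_take_takeWhile]
      have hdrop : lines.drop (i + 1 + tw.length)
          = (lines.drop (i + 1)).dropWhile (fun x => !pvHdr x) := by
        rw [pv_dropWhile_eq_drop, ← htw, List.drop_drop]
      rw [hfn, hslice, pv_join_nl, pvLoop_eq lines (i + 1 + tw.length), hdrop]
    · rw [if_neg hh, pvGo]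
      have hh' : ¬ pvHdr lines[i] = true := hh
      rw [if_neg hh']
      exact pvLoop_eq lines (i + 1)
  · rename_i hi
    rw [List.drop_eq_nil_of_le (by omega), pvGo]
termination_by lines.length - i
decreasing_by
  · have := pvFindNext_ge lines lines.length (i + 1); omega
  · omega

-- what remains to be emitted, given the pending section
def pvRest (cur : Option (List Char × List Char)) (lines : List (List Char)) :
    List (List (String × String)) :=
  match cur with
  | none => pvGo lines
  | some p =>
      pvSec p.1 (p.2 ++ pvJoinNl (lines.takeWhile (fun x => !pvHdr x)))
        :: pvGo (lines.dropWhile (fun x => !pvHdr x))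

-- A's fold, from an arbitrary state, also computes pvGo (plus the pending section)
theorem pvFold_eq (lines : List (List Char)) (secs : List (List (String × String)))
    (cur : Option (List Char × List Char)) :
    pvFinish (lines.foldl pvStep (secs, cur)) = secs ++ pvRest cur lines := by
  induction lines generalizing secs cur with
  | nil =>
    cases cur with
    | none => simp [pvFinish, pvRest, pvGo]
    | some p => simp [pvFinish, pvRest, pvJoinNl, pvGo]
  | cons l rest ih =>
    rw [List.foldl_cons]
    by_cases hh : pvHdr l = true
    · have hjoin : ∀ tw, (l ++ ['\n']) ++ pvJoinNl tw = pvJoinNl (l :: tw) := by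
        intro tw; simp [pvJoinNl]
      cases cur with
      | none =>
        have hstep : pvStep (secs, none) l
            = (secs, some (PySem.List.slice l (some 3) none, l ++ ['\n'])) := by
          unfold pvStep
          rw [if_pos (show PySem.Chars.startswith l ['#', '#', ' '] = true from hh)]
        rw [hstep, ih]
        simp only [pvRest]
        rw [pvGo, if_pos hh, hjoin]
      | some p =>
        have hstep : pvStep (secs, some p) l
            = (secs ++ [pvSec p.1 p.2],
               some (PySem.List.slice l (some 3) none, l ++ ['\n'])) := by
          unfold pvStep
          rw [if_pos (show PySem.Chars.startswith l ['#', '#', ' '] = true from hh)]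
        have hb : (!pvHdr l) = false := by simp [hh]
        rw [hstep, ih]
        simp only [pvRest, List.takeWhile_cons, List.dropWhile_cons, hb,
          Bool.false_eq_true, if_false]
        rw [pvGo, if_pos hh, hjoin]
        simp [pvJoinNl]
    · have hb : (!pvHdr l) = true := by simp [hh]
      cases cur with
      | none =>
        have hstep : pvStep (secs, none) l = (secs, none) := by
          unfold pvStep
          rw [if_neg (show ¬ PySem.Chars.startswith l ['#', '#', ' '] = true from hh)]
        rw [hstep, ih]
        simp only [pvRest]
        rw [pvGo, if_neg hh]
      | some p =>
        have hstep : pvStep (secs, some p) l = (secs, some (p.1, p.2 ++ l ++ ['\n'])) := by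
          unfold pvStep
          rw [if_neg (show ¬ PySem.Chars.startswith l ['#', '#', ' '] = true from hh)]
        rw [hstep, ih]
        simp only [pvRest, List.takeWhile_cons, List.dropWhile_cons, hb, if_true]
        simp [pvJoinNl]

-- ===== VERDICT (by name: the statement is the Claim_ definition above) =====
theorem parse_template_sections_spec : Claim_equal_parse_template_sections := by
  intro template _
  unfold Spec_parse_template_sections parse_template_sections parse_template_sections_alt
  rw [pvFold_eq, pvLoop_eq]
  simp [pvRest]
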